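-- pv_equiv track=rewrite | github.com/sefs93/gh-score | score.py | gh_calculate_score
-- ===== SOURCE A (Python) =====
-- score_mapping = {
--   "PullRequestEvent": 5,
--   "PushEvent": 4,
--   "IssueCommentEvent": 3,
--   "CreateEvent": 2,
--   "default": 1
-- }
--
-- def gh_calculate_score(json_events):
--   gh_score = 0
--
--   for event in json_events:
--     if event["type"] in score_mapping:
--       gh_score += score_mapping[event["type"]]
--     else:
--       gh_score += score_mapping["default"]
--
--   return gh_score
-- ===== SOURCE B (Python) =====
-- score_mapping = {
--   "PullRequestEvent": 5,
--   "PushEvent": 4,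
--   "IssueCommentEvent": 3,
--   "CreateEvent": 2,
--   "default": 1
-- }
--
-- def gh_calculate_score(json_events):
--   # Stage 1: group the events into a frequency table keyed by event type.
--   counts = {}
--   for event in json_events:
--     t = event["type"]
--     counts[t] = counts.get(t, 0) + 1
--   # Stage 2: one pass over the distinct types, weighting each score by its frequency.
--   total = 0
--   for t, n in counts.items():
--     if t == "PullRequestEvent":
--       s = 5
--     elif t == "PushEvent":
--       s = 4
--     elif t == "IssueCommentEvent":
--       s = 3
--     elif t == "CreateEvent":
--       s = 2
--     else:
--       s = 1
--     total += n * s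
--   return total
-- ===== Notes on version B (the rewrite author's own statement) =====
-- stated objective: alternative
-- what changed: B first builds a frequency table of event types with a dict loop and then sums frequency-times-score over the distinct types with the scores resolved by an if/elif chain, instead of A's single per-event scan doing a mapping lookup for every event.
import Mathlib
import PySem

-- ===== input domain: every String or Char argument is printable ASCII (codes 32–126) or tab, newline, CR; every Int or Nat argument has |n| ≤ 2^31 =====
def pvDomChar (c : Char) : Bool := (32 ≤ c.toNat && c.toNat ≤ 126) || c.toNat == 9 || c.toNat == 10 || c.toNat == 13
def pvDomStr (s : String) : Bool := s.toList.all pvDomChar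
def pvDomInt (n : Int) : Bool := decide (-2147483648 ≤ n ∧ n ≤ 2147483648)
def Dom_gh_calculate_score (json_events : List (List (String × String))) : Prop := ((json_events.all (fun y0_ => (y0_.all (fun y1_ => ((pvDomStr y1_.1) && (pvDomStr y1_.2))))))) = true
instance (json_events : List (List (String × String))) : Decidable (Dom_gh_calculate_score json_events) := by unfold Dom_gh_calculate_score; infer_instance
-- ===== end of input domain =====

-- B groups events into a frequency table first and then sums frequency·score over the distinct
-- types (scores via an if-chain), instead of A's per-event dict lookup; alternative, same cost.


-- ===== PORT A =====
-- the module-level score_mapping dict used by A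
def scoreMapping : PySem.Dict String Int :=
  PySem.Dict.ofList [("PullRequestEvent", 5), ("PushEvent", 4), ("IssueCommentEvent", 3),
                     ("CreateEvent", 2), ("default", 1)]

-- A: one pass over the events, looking each event's type up in score_mapping.
-- event["type"] is total via .getD ""; Pre_ guarantees the key is present.
def gh_calculate_score (json_events : List (List (String × String))) : Int :=
  json_events.foldl
    (fun gh_score event =>
      let t := ((PySem.Dict.mk event).get? "type").getD ""
      if scoreMapping.contains t then gh_score + scoreMapping.getD t 0
      else gh_score + scoreMapping.getD "default" 0)
    0

-- ===== PORT B =====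
-- B stage 2's if/elif chain resolving the score of one distinct type
def altScore (t : String) : Int :=
  if t = "PullRequestEvent" then 5
  else if t = "PushEvent" then 4
  else if t = "IssueCommentEvent" then 3
  else if t = "CreateEvent" then 2
  else 1

-- B: build the frequency table, then weight each distinct type's score by its count.
def gh_calculate_score_alt (json_events : List (List (String × String))) : Int :=
  let counts : PySem.Dict String Int :=
    json_events.foldl
      (fun counts event =>
        let t := ((PySem.Dict.mk event).get? "type").getD ""
        counts.insert t (counts.getD t 0 + 1))
      PySem.Dict.empty
  counts.items.foldl (fun total p => total + p.2 * altScore p.1) 0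

-- ===== PRECONDITION & SPEC =====
-- Pre_ excludes exactly the inputs where some event lacks a "type" key: there Python A
-- (and B, in its counting loop) raises KeyError.
def Pre_gh_calculate_score (json_events : List (List (String × String))) : Prop :=
  ∀ event ∈ json_events, (PySem.Dict.mk event).contains "type" = true
instance (json_events : List (List (String × String))) : Decidable (Pre_gh_calculate_score json_events) := by unfold Pre_gh_calculate_score; infer_instance

def pvWitness_gh_calculate_score : (List (List (String × String))) :=
  [[("type", "PushEvent")], [("type", "ForkEvent"), ("id", "7")]]

def Spec_gh_calculate_score (json_events : List (List (String × String))) (out : Int) : Prop := out = gh_calculate_score_alt json_events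
instance (json_events : List (List (String × String))) (out : Int) : Decidable (Spec_gh_calculate_score json_events out) := by unfold Spec_gh_calculate_score; infer_instance

-- ===== CLAIM =====
def Claim_equal_gh_calculate_score : Prop := ∀ (json_events : List (List (String × String))), Dom_gh_calculate_score json_events → Pre_gh_calculate_score json_events → Spec_gh_calculate_score json_events (gh_calculate_score json_events)

-- ===== LEMMAS AND PROOFS =====

-- the type of one event, used only in the proofs to relate the two loops
def pvTypeOf (event : List (String × String)) : String :=
  ((PySem.Dict.mk event).get? "type").getD ""

-- A's per-event branch agrees with B's if-chain on every type string
theorem pv_score_agree (t : String) :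
    (if scoreMapping.contains t then scoreMapping.getD t 0
     else scoreMapping.getD "default" 0) = altScore t := by
  unfold altScore scoreMapping
  by_cases h1 : t = "PullRequestEvent"
  · subst h1; decide
  by_cases h2 : t = "PushEvent"
  · subst h2; decide
  by_cases h3 : t = "IssueCommentEvent"
  · subst h3; decide
  by_cases h4 : t = "CreateEvent"
  · subst h4; decide
  by_cases h5 : t = "default"
  · subst h5; decide
  have hk : (PySem.Dict.ofList [("PullRequestEvent", (5:Int)), ("PushEvent", 4),
      ("IssueCommentEvent", 3), ("CreateEvent", 2), ("default", 1)]).keys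
      = ["PullRequestEvent", "PushEvent", "IssueCommentEvent", "CreateEvent", "default"] := by
    decide
  have hc : (PySem.Dict.ofList [("PullRequestEvent", (5:Int)), ("PushEvent", 4),
      ("IssueCommentEvent", 3), ("CreateEvent", 2), ("default", 1)]).contains t = false := by
    simp [PySem.Dict.contains_eq_decide_mem_keys, hk, h1, h2, h3, h4, h5]
  simp [hc, h1, h2, h3, h4]
  decide

theorem pv_foldl_add_eq_sum {α : Type} (g : α → Int) (l : List α) (a : Int) :
    l.foldl (fun acc x => acc + g x) a = a + (l.map g).sum := by
  induction l generalizing a with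
  | nil => simp
  | cons x xs ih => simp [ih]; ring

-- summing (if k = x then f k else 0) over nodup keys containing x gives f x
theorem pv_sum_if_single {α : Type} [DecidableEq α] (f : α → Int) (x : α) :
    ∀ ks : List α, ks.Nodup → x ∈ ks →
      (ks.map (fun k => if k = x then f k else 0)).sum = f x := by
  intro ks hnd hx
  induction ks with
  | nil => simp at hx
  | cons k ks' ihk =>
    rcases List.mem_cons.mp hx with h | h
    · subst h
      simp only [List.map_cons, List.sum_cons]
      have hz : (ks'.map (fun k' => if k' = x then f k' else 0)).sum = 0 := by
        apply List.sum_eq_zero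
        intro y hy
        rcases List.mem_map.mp hy with ⟨k', hk', hval⟩
        have : ¬ (k' = x) := fun he => (List.nodup_cons.mp hnd).1 (he ▸ hk')
        simpa [this] using hval.symm
      rw [hz]; simp
    · have hne : ¬ (k = x) := fun he => (List.nodup_cons.mp hnd).1 (he ▸ h)
      simp only [List.map_cons, List.sum_cons, if_neg hne]
      rw [ihk (List.nodup_cons.mp hnd).2 h]
      ring

-- summing f over a list equals summing count · f over any nodup list of keys covering it
theorem pv_sum_count_mul {α : Type} [DecidableEq α] (f : α → Int) (l ks : List α)
    (hnd : ks.Nodup) (hcov : ∀ x ∈ l, x ∈ ks) :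
    (ks.map (fun k => (l.count k : Int) * f k)).sum = (l.map f).sum := by
  induction l with
  | nil => simp
  | cons x xs ih =>
    have hx : x ∈ ks := hcov x (List.mem_cons_self)
    have hcov' : ∀ y ∈ xs, y ∈ ks := fun y hy => hcov y (List.mem_cons_of_mem _ hy)
    have hsplit :
        (ks.map (fun k => ((x :: xs).count k : Int) * f k)).sum
          = (ks.map (fun k => (xs.count k : Int) * f k)).sum
            + (ks.map (fun k => if k = x then f k else 0)).sum := by
      rw [← List.sum_map_add]
      apply congrArg
      apply List.map_congr_left
      intro k _
      by_cases hk : k = x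
      · subst hk; simp [List.count_cons_self]; ring
      · have hxk : ¬ (x = k) := fun he => hk he.symm
        simp [hxk, hk]
    rw [hsplit, ih hcov', pv_sum_if_single f x ks hnd hx]
    simp only [List.map_cons, List.sum_cons]
    ring

-- B's counting loop over events is the Counter of the mapped type list
theorem pv_counts_eq_counter (json_events : List (List (String × String))) :
    json_events.foldl
      (fun (counts : PySem.Dict String Int) event =>
        let t := ((PySem.Dict.mk event).get? "type").getD ""
        counts.insert t (counts.getD t 0 + 1))
      PySem.Dict.empty
      = PySem.Dict.counter (json_events.map pvTypeOf) := by
  rw [← PySem.Dict.foldl_insert_getD_add_one_eq_counter, List.foldl_map]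
  rfl

theorem gh_calculate_score_alt_eq (json_events : List (List (String × String))) :
    gh_calculate_score_alt json_events = gh_calculate_score json_events := by
  unfold gh_calculate_score gh_calculate_score_alt
  rw [pv_counts_eq_counter]
  set types := json_events.map pvTypeOf with htypes
  rw [pv_foldl_add_eq_sum]
  have hA : json_events.foldl
      (fun gh_score event =>
        let t := ((PySem.Dict.mk event).get? "type").getD ""
        if scoreMapping.contains t then gh_score + scoreMapping.getD t 0
        else gh_score + scoreMapping.getD "default" 0) 0
      = json_events.foldl (fun gh_score event => gh_score + altScore (pvTypeOf event)) 0 := by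
    apply PySem.List.foldl_congr_mem
    intro acc event _
    simp only [pvTypeOf, ← pv_score_agree]
    split <;> rfl
  rw [hA, pv_foldl_add_eq_sum]
  simp only [zero_add, PySem.Dict.items_counter, List.map_map]
  have := pv_sum_count_mul altScore types (PySem.Set.ofList types)
    (PySem.Set.nodup_ofList types) (fun x hx => (PySem.Set.mem_ofList types x).mpr hx)
  calc ((PySem.Set.ofList types).map
          ((fun p => p.2 * altScore p.1) ∘ fun k => (k, (types.count k : Int)))).sum
      = ((PySem.Set.ofList types).map (fun k => (types.count k : Int) * altScore k)).sum := by
        apply congrArg; apply List.map_congr_left; intro k _; rfl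
    _ = (types.map altScore).sum := this
    _ = (json_events.map (fun e => altScore (pvTypeOf e))).sum := by
        rw [htypes, List.map_map]; rfl

-- ===== VERDICT =====
theorem gh_calculate_score_spec : Claim_equal_gh_calculate_score := by
  intro json_events _ _
  unfold Spec_gh_calculate_score
  exact (gh_calculate_score_alt_eq json_events).symm
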